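-- pv_equiv track=rewrite | github.com/Kirbitz/HandCiphers | complexHandCiphers.py | parse_ciphertext
-- ===== SOURCE A (Python) =====
-- def parse_ciphertext(ciphertext, parseVal, railVal):
--     # Determines how many parts there are based on the railVal
--     plaintextparts = ["" for i in range(railVal)]
--     # Subtracts one from ciphertext length so one letter is removed from the first part
--     ciphertext_length = len(ciphertext) - 1
--     # Calculates how many left over letters there are after the last letter is added to the first row
--     leftoverletters = ciphertext_length % parseVal
--     # Grabs the first part of the ciphertext into plaintext parts by dividing length of ciphertext - 1 by parseVal and adding 1
--     plaintextparts[0] = ciphertext[:ciphertext_length//(parseVal) + 1]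
--     # Removes the first part from the ciphertext
--     ciphertext = ciphertext[ciphertext_length//(parseVal) + 1:]
--     # Loops until number of rails - 1
--     for i in range(1, railVal - 1):
--         # Calculates how long the part should be by taking length of ciphertext - 1 and dividing by parseVal then multiplying by 2
--         parseLength = (ciphertext_length//(parseVal)) * 2
--         # Adds 2 to parseLength if parseVal - leftoverletters is equal to row index
--         if parseVal - leftoverletters == i:
--             parseLength += 2
--             leftoverletters -= 1
--         # Adds 1 to parseLength if previous condition failed and lefteroverletters is greater than row index
--         elif leftoverletters >= i:
--             parseLength += 1
--
--         # Puts ciphertext from 0 to parseLength into plaintextpart at row index i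
--         plaintextparts[i] = ciphertext[:parseLength]
--         # Removes that part from the ciphertext
--         ciphertext = ciphertext[parseLength:]
--     # Puts remaining ciphertext into the last row of plaintextparts
--     plaintextparts[railVal - 1] = ciphertext
--     return plaintextparts
-- ===== SOURCE B (Python) =====
-- def parse_ciphertext(ciphertext, parseVal, railVal):
--     # One pass over computed part lengths; each part sliced once from the
--     # original string at a running integer offset (no repeated re-slicing).
--     n1 = len(ciphertext) - 1
--     base = n1 // parseVal
--     leftover = n1 % parseVal
--     parts = []
--     off = 0
--     for i in range(railVal - 1):
--         if i == 0:
--             partLength = base + 1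
--         elif parseVal - leftover == i:
--             partLength = base * 2 + 2
--             leftover -= 1
--         elif leftover >= i:
--             partLength = base * 2 + 1
--         else:
--             partLength = base * 2
--         parts.append(ciphertext[off:off + partLength])
--         off += partLength
--     parts.append(ciphertext[off:])
--     return parts
-- ===== Notes on version B (the rewrite author's own statement) =====
-- stated objective: faster
-- what changed: B computes each part's length in one pass and slices every part once from the original string at a running integer offset, instead of A's preallocated list with index assignment and repeated re-slicing of the shrinking remainder string.
-- intended difference: For railVal == 1 with a nonempty ciphertext, A returns only a suffix of the ciphertext (the first computed part is consumed and then discarded by the final overwrite of index 0); B returns the whole ciphertext as the single rail, the intended value. — e.g. on parse_ciphertext("abcde", 2, 1): A returns ["de"], B returns ["abcde"]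
-- outside the precondition, e.g. on parse_ciphertext('abcdef', -2, 3): A returns ['abcd', '', 'ef'], B returns ['abcd', '', 'abcdef']; on parse_ciphertext('xy', -1, 2): A returns ['', 'xy'], B returns ['', 'xy']
import Mathlib
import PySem

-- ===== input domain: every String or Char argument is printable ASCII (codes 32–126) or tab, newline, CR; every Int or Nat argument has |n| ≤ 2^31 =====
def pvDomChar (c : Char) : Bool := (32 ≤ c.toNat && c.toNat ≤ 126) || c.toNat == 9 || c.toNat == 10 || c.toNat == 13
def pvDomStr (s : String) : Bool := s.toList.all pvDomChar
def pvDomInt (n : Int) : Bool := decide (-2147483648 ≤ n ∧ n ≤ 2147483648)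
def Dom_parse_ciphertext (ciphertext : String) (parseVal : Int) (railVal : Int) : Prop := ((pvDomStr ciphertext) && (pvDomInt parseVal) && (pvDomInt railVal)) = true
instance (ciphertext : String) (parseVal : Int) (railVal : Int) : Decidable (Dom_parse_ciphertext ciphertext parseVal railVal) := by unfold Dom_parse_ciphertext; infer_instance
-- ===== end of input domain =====

-- B replaces A's repeated re-slicing of the shrinking remainder string (and preallocated
-- list with index assignment) by one pass that slices each part once from the original
-- string at a running integer offset; for railVal == 1 on nonempty input A drops the first
-- computed part (leftover state before the final overwrite) while B returns the whole
-- ciphertext, the intended single rail (see D_parse_ciphertext).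


-- ===== PORT A =====
-- the body of A's 'for i in range(1, railVal - 1)' loop; state = (plaintextparts, ciphertext, leftoverletters)
def pvStepA (ciphertext_length parseVal : Int) (st : List String × String × Int) (i : Int) :
    List String × String × Int :=
  let parseLength := PySem.Int.floordiv ciphertext_length parseVal * 2
  let pl_lo : Int × Int :=
    if parseVal - st.2.2 = i then (parseLength + 2, st.2.2 - 1)
    else if st.2.2 ≥ i then (parseLength + 1, st.2.2)
    else (parseLength, st.2.2)
  (PySem.List.pySetD st.1 i (PySem.Str.slice st.2.1 none (some pl_lo.1)),
   PySem.Str.slice st.2.1 (some pl_lo.1) none, pl_lo.2)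

def parse_ciphertext (ciphertext : String) (parseVal : Int) (railVal : Int) : List String :=
  let plaintextparts : List String := (PySem.List.pyRange 0 railVal 1).map (fun _ => "")
  let ciphertext_length : Int := (PySem.Str.len ciphertext : Int) - 1
  let leftoverletters : Int := PySem.Int.mod ciphertext_length parseVal
  let plaintextparts := PySem.List.pySetD plaintextparts 0
    (PySem.Str.slice ciphertext none (some (PySem.Int.floordiv ciphertext_length parseVal + 1)))
  let ct := PySem.Str.slice ciphertext (some (PySem.Int.floordiv ciphertext_length parseVal + 1)) none
  let st := (PySem.List.pyRange 1 (railVal - 1) 1).foldl (pvStepA ciphertext_length parseVal)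
    (plaintextparts, ct, leftoverletters)
  PySem.List.pySetD st.1 (railVal - 1) st.2.1

-- ===== PORT B =====
-- the body of B's 'for i in range(railVal - 1)' loop; state = (parts, off, leftover)
def pvStepB (ciphertext : String) (base parseVal : Int) (st : List String × Int × Int) (i : Int) :
    List String × Int × Int :=
  let pl_lo : Int × Int :=
    if i = 0 then (base + 1, st.2.2)
    else if parseVal - st.2.2 = i then (base * 2 + 2, st.2.2 - 1)
    else if st.2.2 ≥ i then (base * 2 + 1, st.2.2)
    else (base * 2, st.2.2)
  (st.1 ++ [PySem.Str.slice ciphertext (some st.2.1) (some (st.2.1 + pl_lo.1))],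
   st.2.1 + pl_lo.1, pl_lo.2)

def parse_ciphertext_alt (ciphertext : String) (parseVal : Int) (railVal : Int) : List String :=
  let n1 : Int := (PySem.Str.len ciphertext : Int) - 1
  let base := PySem.Int.floordiv n1 parseVal
  let leftover := PySem.Int.mod n1 parseVal
  let st := (PySem.List.pyRange 0 (railVal - 1) 1).foldl (pvStepB ciphertext base parseVal)
    ([], 0, leftover)
  st.1 ++ [PySem.Str.slice ciphertext (some st.2.1) none]

-- ===== PRECONDITION & SPEC =====
-- Pre_ keeps the cipher's natural domain parseVal ≥ 1 and railVal ≥ 1: A raises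
-- ZeroDivisionError for parseVal == 0 and IndexError for railVal ≤ 0, and for negative
-- parseVal A's negative computed slice lengths make ct[:L] wrap from the end of the
-- string, an accidental fragmentation no rail split means and B does not reproduce.
def Pre_parse_ciphertext (ciphertext : String) (parseVal : Int) (railVal : Int) : Prop :=
  1 ≤ parseVal ∧ 1 ≤ railVal
instance (ciphertext : String) (parseVal : Int) (railVal : Int) : Decidable (Pre_parse_ciphertext ciphertext parseVal railVal) := by unfold Pre_parse_ciphertext; infer_instance

def pvWitness_parse_ciphertext : String × Int × Int := ("abcde", 2, 3)

-- For railVal == 1 with nonempty ciphertext, A returns only a suffix of the ciphertext (the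
-- first computed part is consumed and then discarded by the final overwrite of index 0);
-- B returns the whole ciphertext as the single rail, the intended value.
def D_parse_ciphertext (ciphertext : String) (parseVal : Int) (railVal : Int) : Prop :=
  railVal = 1 ∧ ciphertext ≠ ""
instance (ciphertext : String) (parseVal : Int) (railVal : Int) : Decidable (D_parse_ciphertext ciphertext parseVal railVal) := by unfold D_parse_ciphertext; infer_instance

def Spec_parse_ciphertext (ciphertext : String) (parseVal : Int) (railVal : Int) (out : List String) : Prop := ¬ D_parse_ciphertext ciphertext parseVal railVal → out = parse_ciphertext_alt ciphertext parseVal railVal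
instance (ciphertext : String) (parseVal : Int) (railVal : Int) (out : List String) : Decidable (Spec_parse_ciphertext ciphertext parseVal railVal out) := by unfold Spec_parse_ciphertext; infer_instance

def pvDiffWitness_parse_ciphertext : String × Int × Int := ("abcde", 2, 1)
def pvDiffWitnessOut_parse_ciphertext : (List String) × (List String) := (["de"], ["abcde"])

-- ===== CLAIM (what is proved, stated in full; the proofs are below) =====
def Claim_unchanged_parse_ciphertext : Prop := ∀ (ciphertext : String) (parseVal : Int) (railVal : Int), Dom_parse_ciphertext ciphertext parseVal railVal → Pre_parse_ciphertext ciphertext parseVal railVal → Spec_parse_ciphertext ciphertext parseVal railVal (parse_ciphertext ciphertext parseVal railVal)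
def Claim_changed_parse_ciphertext : Prop := Dom_parse_ciphertext (pvDiffWitness_parse_ciphertext.1) (pvDiffWitness_parse_ciphertext.2.1) (pvDiffWitness_parse_ciphertext.2.2) ∧ Pre_parse_ciphertext (pvDiffWitness_parse_ciphertext.1) (pvDiffWitness_parse_ciphertext.2.1) (pvDiffWitness_parse_ciphertext.2.2) ∧ D_parse_ciphertext (pvDiffWitness_parse_ciphertext.1) (pvDiffWitness_parse_ciphertext.2.1) (pvDiffWitness_parse_ciphertext.2.2) ∧ parse_ciphertext (pvDiffWitness_parse_ciphertext.1) (pvDiffWitness_parse_ciphertext.2.1) (pvDiffWitness_parse_ciphertext.2.2) = pvDiffWitnessOut_parse_ciphertext.1 ∧ parse_ciphertext_alt (pvDiffWitness_parse_ciphertext.1) (pvDiffWitness_parse_ciphertext.2.1) (pvDiffWitness_parse_ciphertext.2.2) = pvDiffWitnessOut_parse_ciphertext.2 ∧ pvDiffWitnessOut_parse_ciphertext.1 ≠ pvDiffWitnessOut_parse_ciphertext.2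
def Claim_exact_parse_ciphertext : Prop := ∀ (ciphertext : String) (parseVal : Int) (railVal : Int), Dom_parse_ciphertext ciphertext parseVal railVal → Pre_parse_ciphertext ciphertext parseVal railVal → D_parse_ciphertext ciphertext parseVal railVal → parse_ciphertext ciphertext parseVal railVal ≠ parse_ciphertext_alt ciphertext parseVal railVal

-- ===== LEMMAS AND PROOFS =====

theorem pv_setD_mid (parts rest : List String) (x v : String) (k : Nat) (hk : parts.length = k) :
    PySem.List.pySetD (parts ++ x :: rest) (k : Int) v = (parts ++ [v]) ++ rest := by
  subst hk
  rw [PySem.List.pySetD_of_nonneg (xs := parts ++ x :: rest) (v := v) (i := (parts.length:Int)) (by positivity)]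
  rw [Int.toNat_natCast, List.set_append_right _ _ (by omega)]
  simp

theorem pv_loop (s : String) (p : Int) (b : Nat)
    (hb : PySem.Int.floordiv ((PySem.Str.len s : Int) - 1) p = (b : Int)) :
    ∀ (n k : Nat), 1 ≤ k →
    ∀ (parts : List String) (off : Nat) (lo : Int), parts.length = k →
    ∃ off' : Nat,
      (PySem.List.pyRange (k : Int) ((k + n : Nat) : Int) 1).foldl
          (pvStepA ((PySem.Str.len s : Int) - 1) p)
          (parts ++ List.replicate (n + 1) "", String.ofList (s.toList.drop off), lo)
        = (((PySem.List.pyRange (k : Int) ((k + n : Nat) : Int) 1).foldl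
              (pvStepB s (b : Int) p) (parts, (off : Int), lo)).1 ++ [""],
           String.ofList (s.toList.drop off'),
           ((PySem.List.pyRange (k : Int) ((k + n : Nat) : Int) 1).foldl
              (pvStepB s (b : Int) p) (parts, (off : Int), lo)).2.2)
      ∧ ((PySem.List.pyRange (k : Int) ((k + n : Nat) : Int) 1).foldl
            (pvStepB s (b : Int) p) (parts, (off : Int), lo)).2.1 = (off' : Int)
      ∧ ((PySem.List.pyRange (k : Int) ((k + n : Nat) : Int) 1).foldl
            (pvStepB s (b : Int) p) (parts, (off : Int), lo)).1.length = k + n := by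
  intro n
  induction n with
  | zero =>
    intro k hk parts off lo hlen
    refine ⟨off, ?_⟩
    simp [hlen]
  | succ n ih =>
    intro k hk parts off lo hlen
    have hcons : PySem.List.pyRange (k : Int) ((k + (n+1) : Nat) : Int) 1
        = (k : Int) :: PySem.List.pyRange ((k : Int) + 1) ((k + (n+1) : Nat) : Int) 1 :=
      PySem.List.pyRange_one_cons (by push_cast; omega)
    have hshift : PySem.List.pyRange ((k : Int) + 1) ((k + (n+1) : Nat) : Int) 1
        = PySem.List.pyRange (((k+1 : Nat)) : Int) (((k+1) + n : Nat) : Int) 1 := by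
      norm_num
      congr 1
      ring
    -- the common (length, leftover) choice of this iteration
    set q : Int × Int :=
      (if p - lo = (k:Int) then ((b:Int) * 2 + 2, lo - 1)
       else if lo ≥ (k:Int) then ((b:Int) * 2 + 1, lo)
       else ((b:Int) * 2, lo)) with hq
    have hq1 : 0 ≤ q.1 := by
      rw [hq]; split_ifs <;> simp <;> positivity
    obtain ⟨L, hL⟩ : ∃ L : Nat, q.1 = (L : Int) := ⟨q.1.toNat, (Int.toNat_of_nonneg hq1).symm⟩
    -- A's step
    have hstepA : pvStepA ((PySem.Str.len s : Int) - 1) p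
        (parts ++ List.replicate (n + 1 + 1) "", String.ofList (s.toList.drop off), lo) (k : Int)
        = ((parts ++ [String.ofList ((s.toList.drop off).take L)]) ++ List.replicate (n + 1) "",
           String.ofList (s.toList.drop (off + L)), q.2) := by
      have hv : PySem.Str.slice (String.ofList (s.toList.drop off)) none (some q.1)
          = String.ofList ((s.toList.drop off).take L) := by
        apply String.toList_inj.mp
        simp [hL, PySem.List.slice_to_natCast]
      have hct : PySem.Str.slice (String.ofList (s.toList.drop off)) (some q.1) none
          = String.ofList (s.toList.drop (off + L)) := by
        apply String.toList_inj.mp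
        simp [hL, PySem.List.slice_from_natCast, List.drop_drop]
      simp only [pvStepA, hb, ← hq, hv, hct]
      rw [List.replicate_succ, pv_setD_mid _ _ _ _ k hlen]
    have hk0 : ¬ ((k:Int) = 0) := by omega
    have hv2 : PySem.Str.slice s (some ((off:Nat):Int)) (some ((off:Int) + q.1))
        = String.ofList ((s.toList.drop off).take L) := by
      apply String.toList_inj.mp
      rw [hL]
      simp [PySem.List.slice_natCast_add]
    have hstepB : pvStepB s (b:Int) p (parts, (off:Int), lo) (k:Int)
        = (parts ++ [String.ofList ((s.toList.drop off).take L)], ((off + L : Nat) : Int), q.2) := by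
      simp only [pvStepB, if_neg hk0, ← hq, hv2]
      refine Prod.ext rfl (Prod.ext ?_ rfl)
      show (off:Int) + q.1 = _
      rw [hL]; push_cast; ring
    rw [hcons]
    simp only [List.foldl_cons, hstepA, hstepB, hshift]
    obtain ⟨off', h1, h2, h3⟩ := ih (k+1) (by omega)
      (parts ++ [String.ofList ((s.toList.drop off).take L)]) (off + L) q.2 (by simp [hlen])
    refine ⟨off', h1, h2, ?_⟩
    rw [h3]; omega

theorem pv_slice_empty (a b : Option Int) : PySem.Str.slice "" a b = "" := by
  apply String.toList_inj.mp
  simp [PySem.List.slice]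

theorem pv_setD_replicate (i : Int) (m : Nat) :
    PySem.List.pySetD (List.replicate m ("":String)) i "" = List.replicate m "" := by
  simp only [PySem.List.pySetD, PySem.List.pySet?]
  cases h : PySem.List.pyIdx? m i <;> simp [h, List.set_replicate_self]

theorem pv_foldA_empty (cl p : Int) (R : List Int) : ∀ (m : Nat) (lo : Int),
    R.foldl (pvStepA cl p) (List.replicate m "", "", lo)
      = (List.replicate m "", "", (R.foldl (pvStepA cl p) (List.replicate m "", "", lo)).2.2) := by
  induction R with
  | nil => intro m lo; rfl
  | cons i R ih =>
    intro m lo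
    simp only [List.foldl_cons]
    have h : pvStepA cl p (List.replicate m "", "", lo) i
        = (List.replicate m "", "",
           (pvStepA cl p (List.replicate m "", "", lo) i).2.2) := by
      simp only [pvStepA, pv_slice_empty, pv_setD_replicate]
    rw [h, ih]

theorem pv_foldB_empty (b p : Int) (R : List Int) : ∀ (parts : List String) (off lo : Int),
    (R.foldl (pvStepB "" b p) (parts, off, lo)).1 = parts ++ List.replicate R.length "" := by
  induction R with
  | nil => intro parts off lo; simp
  | cons i R ih =>
    intro parts off lo
    simp only [List.foldl_cons, pvStepB, pv_slice_empty]
    rw [ih]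
    simp [List.replicate_succ]

theorem pv_empty (p r : Int) (hp : 1 ≤ p) (hr : 1 ≤ r) :
    parse_ciphertext "" p r = parse_ciphertext_alt "" p r := by
  obtain ⟨rn, hrn⟩ : ∃ rn : Nat, r = (rn:Int) := ⟨r.toNat, (Int.toNat_of_nonneg (by omega)).symm⟩
  have hrn1 : 1 ≤ rn := by omega
  have hinit : (PySem.List.pyRange 0 r 1).map (fun _ => ("":String)) = List.replicate rn "" := by
    subst hrn
    rw [PySem.List.pyRange_zero_natCast, List.map_map]
    rw [show ((fun (_ : Int) => ("":String)) ∘ fun (k:Nat) => (k:Int)) = fun (_ : Nat) => ("":String) from rfl]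
    simp [List.map_const']
  have hRlen : (PySem.List.pyRange 0 (r-1) 1).length = rn - 1 := by
    have h1 : r - 1 = ((rn - 1 : Nat) : Int) := by omega
    rw [h1, PySem.List.pyRange_zero_natCast]
    simp
  simp only [parse_ciphertext, parse_ciphertext_alt, hinit, pv_slice_empty, pv_setD_replicate]
  rw [pv_foldA_empty]
  rw [pv_setD_replicate]
  rw [pv_foldB_empty, hRlen]
  have : List.replicate rn ("":String) = List.replicate (rn-1) "" ++ [""] := by
    rw [← List.replicate_succ']
    congr 1
    omega
  simp [this]

theorem pv_main_ne (s : String) (p r : Int) (hp : 1 ≤ p) (hr : 2 ≤ r) (hs : s ≠ "") :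
    parse_ciphertext s p r = parse_ciphertext_alt s p r := by
  obtain ⟨rn, hrn⟩ : ∃ rn : Nat, r = (rn:Int) := ⟨r.toNat, (Int.toNat_of_nonneg (by omega)).symm⟩
  have hrn2 : 2 ≤ rn := by omega
  have hcs : 1 ≤ s.toList.length := by
    cases h : s.toList with
    | nil => exact absurd (String.toList_inj.mp (by simp [h])) hs
    | cons a l => simp
  have hlen : (PySem.Str.len s : Int) = (s.toList.length : Int) := by simp
  have hcl : 0 ≤ (PySem.Str.len s : Int) - 1 := by rw [hlen]; omega
  obtain ⟨b, hb⟩ : ∃ b : Nat, PySem.Int.floordiv ((PySem.Str.len s : Int) - 1) p = (b:Int) := by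
    refine ⟨(PySem.Int.floordiv ((PySem.Str.len s : Int) - 1) p).toNat, (Int.toNat_of_nonneg ?_).symm⟩
    rw [PySem.Int.floordiv_eq_ediv_of_pos (by omega)]
    exact Int.ediv_nonneg hcl (by omega)
  have hb1 : ((b:Int) + 1) = ((b+1:Nat):Int) := by push_cast; ring
  have hfirst : PySem.Str.slice s none (some ((b:Int) + 1))
      = String.ofList (s.toList.take (b+1)) := by
    apply String.toList_inj.mp
    rw [hb1, PySem.Str.toList_slice, PySem.Chars.slice_eq_listSlice,
      PySem.List.slice_to_natCast]
    simp
  have hct0 : PySem.Str.slice s (some ((b:Int) + 1)) none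
      = String.ofList (s.toList.drop (b+1)) := by
    apply String.toList_inj.mp
    rw [hb1, PySem.Str.toList_slice, PySem.Chars.slice_eq_listSlice,
      PySem.List.slice_from_natCast]
    simp
  have hinit : (PySem.List.pyRange 0 r 1).map (fun _ => ("":String)) = List.replicate rn "" := by
    subst hrn
    rw [PySem.List.pyRange_zero_natCast, List.map_map]
    rw [show ((fun (_ : Int) => ("":String)) ∘ fun (k:Nat) => (k:Int)) = fun (_ : Nat) => ("":String) from rfl]
    simp [List.map_const']
  have hset0 : PySem.List.pySetD (List.replicate rn ("":String)) 0 (String.ofList (s.toList.take (b+1)))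
      = [String.ofList (s.toList.take (b+1))] ++ List.replicate ((rn-2)+1) "" := by
    have h1 : List.replicate rn ("":String) = [] ++ "" :: List.replicate ((rn-2)+1) "" := by
      simp only [List.nil_append, ← List.replicate_succ]
      congr 1
      omega
    rw [h1]
    have := pv_setD_mid [] (List.replicate ((rn-2)+1) "") "" (String.ofList (s.toList.take (b+1))) 0 rfl
    simpa using this
  have hrangeA : PySem.List.pyRange 1 (r - 1) 1
      = PySem.List.pyRange ((1:Nat):Int) (((1+(rn-2):Nat)):Int) 1 := by
    have ha : ((1:Nat):Int) = 1 := by simp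
    have hbnd : r - 1 = ((1+(rn-2):Nat):Int) := by push_cast; omega
    rw [ha, ← hbnd]
  have hrangeB : PySem.List.pyRange 0 (r - 1) 1 = 0 :: PySem.List.pyRange 1 (r - 1) 1 :=
    PySem.List.pyRange_one_cons (by omega)
  set lo0 := PySem.Int.mod ((PySem.Str.len s : Int) - 1) p with hlo0
  have hstep0 : pvStepB s (b:Int) p ([], 0, lo0) 0
      = ([String.ofList (s.toList.take (b+1))], ((b+1:Nat):Int), lo0) := by
    simp only [pvStepB]
    refine Prod.ext ?_ (Prod.ext ?_ rfl)
    · show [PySem.Str.slice s (some 0) (some ((0:Int) + ((b:Int)+1)))] = _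
      rw [zero_add, hb1]
      refine congrArg (fun x => [x]) ?_
      apply String.toList_inj.mp
      rw [PySem.Str.toList_slice, PySem.Chars.slice_eq_listSlice]
      rw [show (some ((0:Int))) = some (((0:Nat):Int)) by norm_num]
      rw [PySem.List.slice_natCast]
      simp
    · show (0:Int) + ((b:Int)+1) = _
      push_cast; ring
  obtain ⟨off', h1, h2, h3⟩ := pv_loop s p b hb (rn-2) 1 (le_refl 1)
    [String.ofList (s.toList.take (b+1))] (b+1) lo0 (by simp)
  simp only [parse_ciphertext, parse_ciphertext_alt, hinit, hb, ← hlo0, hfirst, hct0,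
    hset0, hrangeB, List.foldl_cons, hstep0, hrangeA]
  rw [h1]
  have hr1 : r - 1 = (((rn-1:Nat)):Int) := by omega
  have hsetLast := pv_setD_mid
    ((PySem.List.pyRange ((1:Nat):Int) (((1+(rn-2):Nat)):Int) 1).foldl (pvStepB s (b:Int) p)
      ([String.ofList (s.toList.take (b+1))], ((b+1:Nat):Int), lo0)).1
    [] "" (String.ofList (s.toList.drop off')) (rn-1) (by rw [h3]; omega)
  simp only [hr1]
  rw [show ("" :: ([] : List String)) = [""] from rfl] at hsetLast
  rw [hsetLast, h2]
  simp only [List.append_nil]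
  refine congrArg _ ?_
  refine congrArg (fun x => [x]) ?_
  apply String.toList_inj.mp
  rw [PySem.Str.toList_slice, PySem.Chars.slice_eq_listSlice, PySem.List.slice_from_natCast]
  simp

-- ===== VERDICT (by name: the statement is the Claim_ definition above) =====
theorem parse_ciphertext_spec : Claim_unchanged_parse_ciphertext := by
  intro s p r hdom hpre hnd
  obtain ⟨hp, hr⟩ := hpre
  show parse_ciphertext s p r = parse_ciphertext_alt s p r
  by_cases hs : s = ""
  · subst hs; exact pv_empty p r hp hr
  · rcases eq_or_lt_of_le hr with h1 | h2
    · exact absurd ⟨h1.symm, hs⟩ hnd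
    · exact pv_main_ne s p r hp (by omega) hs
theorem parse_ciphertext_changed : Claim_changed_parse_ciphertext := by
  unfold Claim_changed_parse_ciphertext; decide
theorem parse_ciphertext_tight : Claim_exact_parse_ciphertext := by
  intro s p r hdom hpre hd
  obtain ⟨hp, hrr⟩ := hpre
  obtain ⟨hr1, hs⟩ := hd
  subst hr1
  have hcs : 1 ≤ s.toList.length := by
    cases h : s.toList with
    | nil => exact absurd (String.toList_inj.mp (by simp [h])) hs
    | cons a l => simp
  have hlen : (PySem.Str.len s : Int) = (s.toList.length : Int) := by simp
  obtain ⟨b, hb⟩ : ∃ b : Nat, PySem.Int.floordiv ((PySem.Str.len s : Int) - 1) p = (b:Int) := by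
    refine ⟨(PySem.Int.floordiv ((PySem.Str.len s : Int) - 1) p).toNat, (Int.toNat_of_nonneg ?_).symm⟩
    rw [PySem.Int.floordiv_eq_ediv_of_pos (by omega)]
    refine Int.ediv_nonneg (by omega) (by omega)
  have hb1 : ((b:Int) + 1) = ((b+1:Nat):Int) := by push_cast; ring
  have hct0 : PySem.Str.slice s (some ((b:Int) + 1)) none
      = String.ofList (s.toList.drop (b+1)) := by
    apply String.toList_inj.mp
    rw [hb1, PySem.Str.toList_slice, PySem.Chars.slice_eq_listSlice,
      PySem.List.slice_from_natCast]
    simp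
  have e2 : (1:Int) - 1 = 0 := by norm_num
  have e3 : PySem.List.pyRange 1 (0:Int) 1 = [] := by decide
  have e3' : PySem.List.pyRange 0 (0:Int) 1 = [] := by decide
  have e1 : (PySem.List.pyRange 0 (1:Int) 1).map (fun _ => ("":String)) = [""] := by decide
  have e4 : ∀ v w : String, PySem.List.pySetD [w] (0:Int) v = [v] := by
    intro v w
    have := pv_setD_mid [] [] w v 0 rfl
    simpa using this
  have hA : parse_ciphertext s p 1 = [String.ofList (s.toList.drop (b+1))] := by
    simp only [parse_ciphertext, e1, e2, e3, List.foldl_nil, e4, hb, hct0]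
  have hB : parse_ciphertext_alt s p 1 = [PySem.Str.slice s (some (0:Int)) none] := by
    simp only [parse_ciphertext_alt, e2, e3', List.foldl_nil, List.nil_append]
  have hB2 : PySem.Str.slice s (some (0:Int)) none = s := by
    apply String.toList_inj.mp
    rw [show (some (0:Int)) = some (((0:Nat)):Int) by norm_num]
    rw [PySem.Str.toList_slice, PySem.Chars.slice_eq_listSlice, PySem.List.slice_from_natCast]
    simp
  rw [hA, hB, hB2]
  intro heq
  have h5 : String.ofList (s.toList.drop (b+1)) = s := by
    simpa using heq
  have h6 : s.toList.drop (b+1) = s.toList := by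
    have := congrArg String.toList h5
    simpa using this
  have h7 : s.toList.length - (b+1) = s.toList.length := by
    simpa using congrArg List.length h6
  omega
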